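-- pv_equiv track=rewrite | github.com/pypi-data/pypi-mirror-335 | packages/trustrag/trustrag-0.0.15-py3-none-any.whl/trustrag/modules/document/markdown_parser.py | merge_data_entries
-- ===== SOURCE A (Python) =====
-- def merge_data_entries(data_list):
--     """
--     Merge data entries where content is empty with subsequent entries.
--
--     Args:
--         data_list (list): List of dictionaries with 'title' and 'content' keys
--
--     Returns:
--         list: Processed list with merged entries
--     """
--     if not data_list:
--         return []
--
--     result = []
--     i = 0
--     while i < len(data_list):
--         current = data_list[i]
--
--         # If content is not empty, add to result and move to next item
--         if current["content"]:
--             result.append(current.copy())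
--             i += 1
--             continue
--
--         # If content is empty, need to merge with subsequent entries
--         merged_title = current["title"]
--         merged_content = ""
--         j = i + 1
--
--         # Look ahead to find first non-empty content
--         while j < len(data_list):
--             next_item = data_list[j]
--             merged_title += " " + next_item["title"].strip('# ')
--
--             if next_item["content"]:
--                 merged_content = next_item["content"]
--                 break
--
--             j += 1
--
--         # Create merged entry
--         result.append({
--             "title": merged_title,
--             "content": merged_content
--         })
--
--         # Skip all entries that were merged
--         i = j + 1 if j < len(data_list) else len(data_list)
--
--     return result
-- ===== SOURCE B (Python) =====
-- def merge_data_entries(data_list):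
--     """Single pass with a 'merging' accumulator instead of nested index loops."""
--     result = []
--     merged_title = None  # None = not merging; otherwise the accumulated title
--     for item in data_list:
--         if merged_title is None:
--             if item["content"]:
--                 result.append(item.copy())
--             else:
--                 merged_title = item["title"]
--         else:
--             merged_title += " " + item["title"].strip('# ')
--             if item["content"]:
--                 result.append({"title": merged_title, "content": item["content"]})
--                 merged_title = None
--     if merged_title is not None:
--         result.append({"title": merged_title, "content": ""})
--     return result
-- ===== Notes on version B (the rewrite author's own statement) =====
-- stated objective: simpler
-- what changed: Replaced A's outer while-loop with index arithmetic and a nested look-ahead scan by one single pass over the list carrying a 'currently merging' title accumulator, flushed after the loop.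
import Mathlib
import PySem

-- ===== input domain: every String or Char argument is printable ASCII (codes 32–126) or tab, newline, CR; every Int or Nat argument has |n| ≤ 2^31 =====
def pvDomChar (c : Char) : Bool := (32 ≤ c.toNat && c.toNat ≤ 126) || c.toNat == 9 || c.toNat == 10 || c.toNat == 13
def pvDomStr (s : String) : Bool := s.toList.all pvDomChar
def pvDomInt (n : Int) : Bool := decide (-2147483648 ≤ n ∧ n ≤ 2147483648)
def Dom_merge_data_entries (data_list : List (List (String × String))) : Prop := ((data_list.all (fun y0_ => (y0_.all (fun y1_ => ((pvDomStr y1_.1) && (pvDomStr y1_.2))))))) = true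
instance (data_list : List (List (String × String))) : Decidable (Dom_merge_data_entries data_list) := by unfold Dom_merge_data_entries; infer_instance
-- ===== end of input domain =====

-- B replaces A's outer while-loop with index arithmetic plus a nested look-ahead scan
-- by one single pass carrying a 'currently merging' title accumulator (objective: simpler).


-- ===== PORT A =====
-- the assoc list as the Python dict it denotes (duplicate keys: last value wins, first position kept)
def pvDict (d : List (String × String)) : List (String × String) :=
  (PySem.Dict.ofList d).items

-- d[k] for that dict (Pre_ guarantees the key is present)
def pvLook (d : List (String × String)) (k : String) : String :=
  ((PySem.Dict.ofList d).get? k).getD ""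

-- inner 'while j < len(data_list)' look-ahead loop: returns (merged_title, merged_content, j).
-- 'fuel' only bounds the iteration count (data.length always suffices); it changes nothing else.
def pvAInner (data : List (List (String × String))) (fuel : Nat) (j : Nat) (mt : String) :
    String × String × Nat :=
  match fuel with
  | 0 => (mt, "", j)
  | fuel + 1 =>
    if h : j < data.length then
      let next := data[j]
      let mt' := mt ++ " " ++ PySem.Str.stripChars (pvLook next "title") "# "
      if pvLook next "content" ≠ "" then (mt', pvLook next "content", j)
      else pvAInner data fuel (j + 1) mt'
    else (mt, "", j)

-- outer 'while i < len(data_list)' loop (fuel bounds the iteration count; i advances each round)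
def pvAOuter (data : List (List (String × String))) (fuel : Nat) (i : Nat)
    (result : List (List (String × String))) : List (List (String × String)) :=
  match fuel with
  | 0 => result
  | fuel + 1 =>
    if h : i < data.length then
      let current := data[i]
      if pvLook current "content" ≠ "" then
        pvAOuter data fuel (i + 1) (result ++ [pvDict current])
      else
        let r := pvAInner data data.length (i + 1) (pvLook current "title")
        let i' := if r.2.2 < data.length then r.2.2 + 1 else data.length
        pvAOuter data fuel i' (result ++ [[("title", r.1), ("content", r.2.1)]])
    else result

def merge_data_entries (data_list : List (List (String × String))) :
    List (List (String × String)) :=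
  if data_list = [] then [] else pvAOuter data_list data_list.length 0 []

-- ===== PORT B =====
-- one step of B's for-loop; state = (result so far, currently-merging title or none)
def pvBStep (st : List (List (String × String)) × Option String)
    (item : List (String × String)) : List (List (String × String)) × Option String :=
  match st.2 with
  | none =>
      if pvLook item "content" ≠ "" then (st.1 ++ [pvDict item], none)
      else (st.1, some (pvLook item "title"))
  | some mt =>
      let mt' := mt ++ " " ++ PySem.Str.stripChars (pvLook item "title") "# "
      if pvLook item "content" ≠ "" then
        (st.1 ++ [[("title", mt'), ("content", pvLook item "content")]], none)
      else (st.1, some mt')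

def merge_data_entries_alt (data_list : List (List (String × String))) :
    List (List (String × String)) :=
  let st := data_list.foldl pvBStep ([], none)
  match st.2 with
  | some mt => st.1 ++ [[("title", mt), ("content", "")]]
  | none => st.1

-- ===== PRECONDITION & SPEC =====
-- Pre_ excludes exactly the inputs where A raises KeyError: a dict missing "content", or
-- missing "title" where A reads it (its own content empty, or the preceding dict's content empty).
def Pre_merge_data_entries (data_list : List (List (String × String))) : Prop :=
  (∀ d ∈ data_list, "content" ∈ d.map Prod.fst ∧
      (pvLook d "content" = "" → "title" ∈ d.map Prod.fst)) ∧
  ∀ p ∈ data_list.zip data_list.tail, pvLook p.1 "content" = "" → "title" ∈ p.2.map Prod.fst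
instance (data_list : List (List (String × String))) : Decidable (Pre_merge_data_entries data_list) := by unfold Pre_merge_data_entries; infer_instance

def pvWitness_merge_data_entries : (List (List (String × String))) :=
  [[("title", "# A"), ("content", "")], [("title", "## B"), ("content", "body")]]

def Spec_merge_data_entries (data_list : List (List (String × String))) (out : List (List (String × String))) : Prop := out = merge_data_entries_alt data_list
instance (data_list : List (List (String × String))) (out : List (List (String × String))) : Decidable (Spec_merge_data_entries data_list out) := by unfold Spec_merge_data_entries; infer_instance

-- ===== CLAIM (what is proved, stated in full; the proofs are below) =====
def Claim_equal_merge_data_entries : Prop := ∀ (data_list : List (List (String × String))), Dom_merge_data_entries data_list → Pre_merge_data_entries data_list → Spec_merge_data_entries data_list (merge_data_entries data_list)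

-- ===== LEMMAS AND PROOFS =====

-- common reference function: what both loops produce on the remaining suffix,
-- given the optional currently-merging title
def pvGo (st : Option String) (l : List (List (String × String))) :
    List (List (String × String)) :=
  match st, l with
  | none, [] => []
  | none, x :: r =>
      if pvLook x "content" ≠ "" then pvDict x :: pvGo none r
      else pvGo (some (pvLook x "title")) r
  | some mt, [] => [[("title", mt), ("content", "")]]
  | some mt, y :: r =>
      let mt' := mt ++ " " ++ PySem.Str.stripChars (pvLook y "title") "# "
      if pvLook y "content" ≠ "" then
        [("title", mt'), ("content", pvLook y "content")] :: pvGo none r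
      else pvGo (some mt') r

-- B's fold, then flush, equals res ++ pvGo st l
theorem pvB_go (l : List (List (String × String)))
    (res : List (List (String × String))) (st : Option String) :
    (match (l.foldl pvBStep (res, st)).2 with
     | some mt => (l.foldl pvBStep (res, st)).1 ++ [[("title", mt), ("content", "")]]
     | none => (l.foldl pvBStep (res, st)).1) = res ++ pvGo st l := by
  induction l generalizing res st with
  | nil => cases st <;> simp [pvGo]
  | cons x r ih =>
    cases st with
    | none =>
      by_cases hc : pvLook x "content" ≠ ""
      · simp [pvBStep, if_pos hc, pvGo, ih]
      · simp [pvBStep, pvGo, ih, hc]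
    | some mt =>
      by_cases hc : pvLook x "content" ≠ ""
      · simp [pvBStep, if_pos hc, pvGo, ih]
      · simp [pvBStep, pvGo, ih, hc]

-- the returned index j never decreases
theorem pvAInner_ge (data : List (List (String × String))) (fuel j : Nat) (mt : String) :
    j ≤ (pvAInner data fuel j mt).2.2 := by
  induction fuel generalizing j mt with
  | zero => simp [pvAInner]
  | succ fuel ih =>
    simp only [pvAInner]
    split
    · split
      · simp
      · exact le_trans (by omega) (ih (j + 1) _)
    · simp

-- A's inner look-ahead loop computes exactly one pvGo-merge step (fuel sufficient)
theorem pvAInner_go (data : List (List (String × String))) (fuel j : Nat) (mt : String)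
    (hf : data.length ≤ fuel + j) :
    pvGo (some mt) (data.drop j) =
      [("title", (pvAInner data fuel j mt).1), ("content", (pvAInner data fuel j mt).2.1)] ::
        pvGo none (data.drop ((pvAInner data fuel j mt).2.2 + 1)) := by
  induction fuel generalizing j mt with
  | zero =>
    have h2 : data.drop ((pvAInner data 0 j mt).2.2 + 1) = [] := by
      simp only [pvAInner]
      exact List.drop_eq_nil_of_le (by omega)
    rw [List.drop_eq_nil_of_le (show data.length ≤ j by omega), h2]
    simp [pvAInner, pvGo]
  | succ fuel ih =>
    by_cases h : j < data.length
    · rw [List.drop_eq_getElem_cons h]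
      by_cases hc : pvLook data[j] "content" ≠ ""
      · simp only [pvAInner, dif_pos h, if_pos hc, pvGo]
      · simp only [pvAInner, dif_pos h, if_neg hc, pvGo]
        exact ih (j + 1) _ (by omega)
    · have h2 : data.drop ((pvAInner data (fuel + 1) j mt).2.2 + 1) = [] := by
        simp only [pvAInner, dif_neg h]
        exact List.drop_eq_nil_of_le (by omega)
      rw [List.drop_eq_nil_of_le (show data.length ≤ j by omega), h2]
      simp [pvAInner, dif_neg h, pvGo]

-- A's outer loop equals res ++ pvGo none (remaining suffix) (fuel sufficient)
theorem pvAOuter_go (data : List (List (String × String))) (fuel i : Nat)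
    (result : List (List (String × String))) (hf : data.length ≤ fuel + i) :
    pvAOuter data fuel i result = result ++ pvGo none (data.drop i) := by
  induction fuel generalizing i result with
  | zero =>
    rw [List.drop_eq_nil_of_le (by omega)]
    simp [pvAOuter, pvGo]
  | succ fuel ih =>
    by_cases h : i < data.length
    · rw [List.drop_eq_getElem_cons h]
      by_cases hc : pvLook data[i] "content" ≠ ""
      · simp only [pvAOuter, dif_pos h, if_pos hc]
        rw [ih (i + 1) (result ++ [pvDict data[i]]) (by omega)]
        simp only [pvGo, if_pos hc, List.append_assoc, List.singleton_append]
      · simp only [pvAOuter, dif_pos h, if_neg hc]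
        have hge := pvAInner_ge data data.length (i + 1) (pvLook data[i] "title")
        set r := pvAInner data data.length (i + 1) (pvLook data[i] "title") with hr
        set i' := if r.2.2 < data.length then r.2.2 + 1 else data.length with hi'
        have hif : data.length ≤ fuel + i' := by
          rw [hi']; split <;> omega
        rw [ih i' _ hif]
        have hin := pvAInner_go data data.length (i + 1) (pvLook data[i] "title") (by omega)
        have hdrop : data.drop i' = data.drop (r.2.2 + 1) := by
          rw [hi']
          by_cases hj : r.2.2 < data.length
          · rw [if_pos hj]
          · rw [if_neg hj, List.drop_eq_nil_of_le (le_refl _),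
              List.drop_eq_nil_of_le (show data.length ≤ r.2.2 + 1 by omega)]
        rw [hdrop]
        simp only [pvGo, if_neg hc]
        rw [hin, ← hr]
        simp [List.append_assoc]
    · rw [List.drop_eq_nil_of_le (by omega)]
      simp [pvAOuter, dif_neg h, pvGo]

-- ===== VERDICT (by name: the statement is the Claim_ definition above) =====
theorem merge_data_entries_spec : Claim_equal_merge_data_entries := by
  intro data_list _ _
  unfold Spec_merge_data_entries merge_data_entries merge_data_entries_alt
  have hb := pvB_go data_list [] none
  simp only [List.nil_append] at hb
  split
  · next he =>
      subst he
      simp only [pvGo] at hb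
      exact hb.symm
  · rw [pvAOuter_go data_list data_list.length 0 [] (by omega)]
    simp only [List.drop_zero, List.nil_append]
    exact hb.symm
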